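-- pv_equiv track=rewrite | github.com/derenay/ForTra | generatedatav2/g4.py | generate_regular_wedge
-- ===== SOURCE A (Python) =====
-- def generate_regular_wedge(num_objects, center, spread):
--     # Lider tank merkeze yerleştirilir; sonra soldan ve sağdan eklenir.
--     cx, cy = center
--     coords = []
--     coords.append([cx, cy])
--     i = 1
--     while len(coords) < num_objects:
--         left_x = cx - spread * i
--         left_y = cy - spread * i
--         coords.append([left_x, left_y])
--         if len(coords) >= num_objects:
--             break
--         right_x = cx + spread * i
--         right_y = cy - spread * i
--         coords.append([right_x, right_y])
--         i += 1
--     return coords[:num_objects]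
-- ===== SOURCE B (Python) =====
-- def generate_regular_wedge(num_objects, center, spread):
--     # Staged construction: build the left-arm and right-arm point lists
--     # separately, interleave them with zip, prepend the leader, then slice.
--     cx, cy = center
--     pairs = num_objects // 2
--     lefts = [[cx - spread * p, cy - spread * p] for p in range(1, pairs + 1)]
--     rights = [[cx + spread * p, cy - spread * p] for p in range(1, pairs + 1)]
--     interleaved = [pt for pair in zip(lefts, rights) for pt in pair]
--     return ([[cx, cy]] + interleaved)[:num_objects]
-- ===== Notes on version B (the rewrite author's own statement) =====
-- stated objective: alternative
-- what changed: Replaces the incremental while-loop that appends left/right points one by one with a counter and mid-loop break by a staged construction: it builds the whole left-arm and right-arm lists separately, interleaves them with zip, prepends the leader and slices to length.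
import Mathlib
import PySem

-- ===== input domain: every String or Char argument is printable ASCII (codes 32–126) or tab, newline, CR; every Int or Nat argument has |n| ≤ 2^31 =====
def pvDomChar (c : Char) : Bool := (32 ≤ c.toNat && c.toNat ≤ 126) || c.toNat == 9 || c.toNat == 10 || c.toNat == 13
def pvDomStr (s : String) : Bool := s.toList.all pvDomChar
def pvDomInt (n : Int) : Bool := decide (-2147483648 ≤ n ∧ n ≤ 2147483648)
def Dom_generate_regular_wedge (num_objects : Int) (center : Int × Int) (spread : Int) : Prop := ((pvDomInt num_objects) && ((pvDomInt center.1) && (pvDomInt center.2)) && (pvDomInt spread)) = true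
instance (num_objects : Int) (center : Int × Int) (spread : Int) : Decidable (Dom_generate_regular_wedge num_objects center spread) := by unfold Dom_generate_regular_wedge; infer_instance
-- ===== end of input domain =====

-- B replaces A's incremental while-loop (counter, mid-loop break) by a staged
-- construction: build the left-arm and right-arm lists, interleave with zip,
-- prepend the leader, slice (objective: alternative).

-- ===== PORT A =====
-- A's while-loop: state is (coords, i); terminates because each iteration grows coords.
def wedgeLoop (n cx cy s : Int) (coords : List (List Int)) (i : Int) : List (List Int) :=
  if (coords.length : Int) < n then
    let coords2 := coords ++ [[cx - s * i, cy - s * i]]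
    if n ≤ (coords2.length : Int) then coords2
    else wedgeLoop n cx cy s (coords2 ++ [[cx + s * i, cy - s * i]]) (i + 1)
  else coords
termination_by (n - coords.length).toNat
decreasing_by simp_all; omega

def generate_regular_wedge (num_objects : Int) (center : Int × Int) (spread : Int) : List (List Int) :=
  PySem.List.slice (wedgeLoop num_objects center.1 center.2 spread [[center.1, center.2]] 1) none (some num_objects)

-- ===== PORT B =====
def generate_regular_wedge_alt (num_objects : Int) (center : Int × Int) (spread : Int) : List (List Int) :=
  let cx := center.1
  let cy := center.2
  let pairs := PySem.Int.floordiv num_objects 2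
  let lefts := (PySem.List.pyRange 1 (pairs + 1) 1).map (fun p => [cx - spread * p, cy - spread * p])
  let rights := (PySem.List.pyRange 1 (pairs + 1) 1).map (fun p => [cx + spread * p, cy - spread * p])
  let interleaved := (lefts.zip rights).flatMap (fun ab => [ab.1, ab.2])
  PySem.List.slice ([[cx, cy]] ++ interleaved) none (some num_objects)

-- ===== PRECONDITION & SPEC =====
def Spec_generate_regular_wedge (num_objects : Int) (center : Int × Int) (spread : Int) (out : List (List Int)) : Prop := out = generate_regular_wedge_alt num_objects center spread
instance (num_objects : Int) (center : Int × Int) (spread : Int) (out : List (List Int)) : Decidable (Spec_generate_regular_wedge num_objects center spread out) := by unfold Spec_generate_regular_wedge; infer_instance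

-- ===== CLAIM (what is proved, stated in full; the proofs are below) =====
def Claim_equal_generate_regular_wedge : Prop := ∀ (num_objects : Int) (center : Int × Int) (spread : Int), Dom_generate_regular_wedge num_objects center spread → Spec_generate_regular_wedge num_objects center spread (generate_regular_wedge num_objects center spread)

-- ===== LEMMAS AND PROOFS =====

-- the j-th wedge point (proof-only normal form, shared by both sides)
def wedgePoint (cx cy s : Int) (j : Int) : List Int :=
  if j == 0 then [cx, cy]
  else if PySem.Int.mod j 2 == 1 then
    let p := PySem.Int.floordiv (j + 1) 2
    [cx - s * p, cy - s * p]
  else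
    let p := PySem.Int.floordiv j 2
    [cx + s * p, cy - s * p]

def pref (cx cy s : Int) (m : Nat) : List (List Int) :=
  (List.range m).map (fun j : Nat => wedgePoint cx cy s (j : Int))

theorem length_pref (cx cy s : Int) (m : Nat) : (pref cx cy s m).length = m := by
  simp [pref]

theorem pref_succ (cx cy s : Int) (m : Nat) :
    pref cx cy s (m + 1) = pref cx cy s m ++ [wedgePoint cx cy s (m : Int)] := by
  simp [pref, List.range_succ]

theorem wedgePoint_zero (cx cy s : Int) : wedgePoint cx cy s 0 = [cx, cy] := by
  simp [wedgePoint]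

theorem wedgePoint_odd (cx cy s i : Int) :
    wedgePoint cx cy s (2 * i - 1) = [cx - s * i, cy - s * i] := by
  have h0 : ¬ (2 * i - 1 = 0) := by omega
  simp [wedgePoint, h0, PySem.Int.mod, PySem.Int.floordiv]

theorem wedgePoint_even (cx cy s i : Int) (hi : 1 ≤ i) :
    wedgePoint cx cy s (2 * i) = [cx + s * i, cy - s * i] := by
  have h0 : ¬ (2 * i = 0) := by omega
  simp [wedgePoint, h0, PySem.Int.mod, PySem.Int.floordiv]

theorem wedgeLoop_eq_pref (cx cy s : Int) :
    ∀ (k : Nat) (n i : Int), 1 ≤ i → (n - (2 * i - 1)).toNat = k →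
      wedgeLoop n cx cy s (pref cx cy s (2 * i - 1).toNat) i
        = pref cx cy s (max n (2 * i - 1)).toNat := by
  intro k
  induction k using Nat.strong_induction_on with
  | _ k IH =>
    intro n i hi hk
    have hcast : (((2 * i - 1).toNat : Int)) = 2 * i - 1 := by omega
    rw [wedgeLoop]
    by_cases hlt : ((pref cx cy s (2 * i - 1).toNat).length : Int) < n
    · rw [length_pref] at hlt
      rw [hcast] at hlt
      have hL : pref cx cy s (2 * i - 1).toNat ++ [[cx - s * i, cy - s * i]]
          = pref cx cy s (2 * i).toNat := by
        have : (2 * i).toNat = (2 * i - 1).toNat + 1 := by omega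
        rw [this, pref_succ]
        have : (((2 * i - 1).toNat : Nat) : Int) = 2 * i - 1 := hcast
        rw [this, wedgePoint_odd cx cy s i]
      simp only [length_pref, hcast, if_pos hlt, hL]
      by_cases hbrk : n ≤ ((pref cx cy s (2 * i).toNat).length : Int)
      · rw [length_pref] at hbrk
        have hn : n = 2 * i := by omega
        simp only [if_pos (by omega : n ≤ (((2 * i).toNat : Nat) : Int))]
        congr 1
        omega
      · rw [length_pref] at hbrk
        have hgt : 2 * i < n := by omega
        have hR : pref cx cy s (2 * i).toNat ++ [[cx + s * i, cy - s * i]]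
            = pref cx cy s (2 * (i + 1) - 1).toNat := by
          have : (2 * (i + 1) - 1).toNat = (2 * i).toNat + 1 := by omega
          rw [this, pref_succ]
          have h2 : (((2 * i).toNat : Nat) : Int) = 2 * i := by omega
          rw [h2, wedgePoint_even cx cy s i (by omega)]
        simp only [if_neg (by omega : ¬ n ≤ (((2 * i).toNat : Nat) : Int)), hR]
        have hrec := IH (n - (2 * (i + 1) - 1)).toNat (by omega) n (i + 1) (by omega) rfl
        rw [hrec]
        congr 1
        omega
    · rw [length_pref, hcast] at hlt
      simp only [length_pref, hcast] at hlt ⊢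
      rw [if_neg hlt, max_eq_right (by omega : n ≤ 2 * i - 1)]

theorem pref_one (cx cy s : Int) : pref cx cy s 1 = [[cx, cy]] := by
  simp [pref, List.range_succ, wedgePoint_zero]

-- B's staged construction for k pairs equals the first 2k+1 wedge points
theorem interleave_eq_pref (cx cy s : Int) (k : Nat) :
    [[cx, cy]] ++ ((((PySem.List.pyRange 1 ((k : Int) + 1) 1).map (fun p => [cx - s * p, cy - s * p])).zip
        ((PySem.List.pyRange 1 ((k : Int) + 1) 1).map (fun p => [cx + s * p, cy - s * p]))).flatMap
        (fun ab => [ab.1, ab.2])) = pref cx cy s (2 * k + 1) := by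
  induction k with
  | zero =>
    rw [PySem.List.pyRange_one_eq_nil (by norm_num)]
    simpa using (pref_one cx cy s).symm
  | succ k ih =>
    have hsplit : PySem.List.pyRange 1 (((k + 1 : Nat) : Int) + 1) 1
        = PySem.List.pyRange 1 ((k : Int) + 1) 1 ++ [(k : Int) + 1] := by
      have : (((k + 1 : Nat) : Int) + 1) = ((k : Int) + 1) + 1 := by push_cast; ring
      rw [this, PySem.List.pyRange_one_succ_right (by omega)]
    rw [hsplit, List.map_append, List.map_append,
        List.zip_append (by simp), List.flatMap_append]
    have hO : pref cx cy s (2 * (k + 1) + 1)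
        = pref cx cy s (2 * k + 1) ++ [wedgePoint cx cy s ((2 * k + 1 : Nat) : Int)]
            ++ [wedgePoint cx cy s ((2 * k + 2 : Nat) : Int)] := by
      have h1 : 2 * (k + 1) + 1 = (2 * k + 1) + 1 + 1 := by omega
      rw [h1, pref_succ, pref_succ]
    have hodd : wedgePoint cx cy s ((2 * k + 1 : Nat) : Int)
        = [cx - s * ((k : Int) + 1), cy - s * ((k : Int) + 1)] := by
      have : ((2 * k + 1 : Nat) : Int) = 2 * ((k : Int) + 1) - 1 := by push_cast; ring
      rw [this, wedgePoint_odd]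
    have heven : wedgePoint cx cy s ((2 * k + 2 : Nat) : Int)
        = [cx + s * ((k : Int) + 1), cy - s * ((k : Int) + 1)] := by
      have : ((2 * k + 2 : Nat) : Int) = 2 * ((k : Int) + 1) := by push_cast; ring
      rw [this, wedgePoint_even cx cy s ((k : Int) + 1) (by omega)]
    rw [hO, hodd, heven]
    simp only [List.map_cons, List.map_nil, List.zip_cons_cons, List.zip_nil_right,
      List.flatMap_cons, List.flatMap_nil]
    rw [← ih]
    simp

theorem pref_take (cx cy s : Int) (t m : Nat) :
    (pref cx cy s m).take t = pref cx cy s (min t m) := by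
  unfold pref
  rw [← List.map_take, List.take_range]

-- ===== VERDICT (by name: the statement is the Claim_ definition above) =====
theorem generate_regular_wedge_spec : Claim_equal_generate_regular_wedge := by
  intro n c s _
  unfold Spec_generate_regular_wedge generate_regular_wedge generate_regular_wedge_alt
  obtain ⟨cx, cy⟩ := c
  simp only
  by_cases hn : 1 ≤ n
  · -- A side: wedgeLoop produces pref n.toNat
    have hA := wedgeLoop_eq_pref cx cy s (n - (2 * 1 - 1)).toNat n 1 le_rfl rfl
    have h1 : (2 * (1:Int) - 1).toNat = 1 := by decide
    rw [h1, pref_one] at hA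
    have hmax : (max n (2 * (1:Int) - 1)).toNat = n.toNat := by omega
    rw [hmax] at hA
    rw [hA]
    -- B side: interleave produces pref (2k+1)
    have hfd : PySem.Int.floordiv n 2 = n / 2 :=
      PySem.Int.floordiv_eq_ediv_of_pos (by omega)
    have hknn : 0 ≤ n / 2 := by omega
    have hkc : ((n / 2).toNat : Int) = n / 2 := by omega
    have hB := interleave_eq_pref cx cy s (n / 2).toNat
    rw [hkc] at hB
    rw [hfd, hB]
    rw [PySem.List.slice_to _ (by omega : (0:Int) ≤ n),
        PySem.List.slice_to _ (by omega : (0:Int) ≤ n)]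
    rw [List.take_of_length_le (by rw [length_pref]), pref_take]
    congr 1
    omega
  · -- n ≤ 0: both sides are []
    have hloop : wedgeLoop n cx cy s [[cx, cy]] 1 = [[cx, cy]] := by
      rw [wedgeLoop]
      simp only [List.length_cons, List.length_nil]
      rw [if_neg (by omega : ¬ (((0+1 : Nat) : Int) < n))]
    rw [hloop]
    have hfd : PySem.Int.floordiv n 2 + 1 ≤ 1 := by
      have := PySem.Int.floordiv_mul_add_mod n 2
      have hm := PySem.Int.mod_two_eq n
      omega
    rw [PySem.List.pyRange_one_eq_nil hfd]
    simp only [List.map_nil, List.zip_nil_right, List.flatMap_nil, List.append_nil]
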